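-- pv_equiv track=rewrite | github.com/pearsettings44/FP---proj1 | main.py | validar_a_cifra
-- ===== SOURCE A (Python) =====
-- def validar_a_cifra(cifra):
--     """
--     Função auxiliar à função eh_entrada: verifica a validade da cifra.
--     str ---> bool
--     """
--     # Verificar a validade do argumento, retornando False caso o argumento não seja válido.
--     if type(cifra) != str or len(cifra) == 0:
--         return False
--     # O argumento só tem letras minusculas e '-', caso só tenha uma letra, não tem '-'.
--     for c in cifra:
--         if not c.isalpha() and c != "-" or (len(cifra) == 1 and c == "-") or (c.lower() != c):
--             return False
--     # O argumento não tem dois '-' de seguida.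
--     i = 0
--     while i < len(cifra) - 1:
--         if cifra[i] == "-" and cifra[i] == cifra[i + 1]:
--             return False
--         i += 1
--     # O argumento não começa nem acaba com '-'.
--     if cifra[-1] == "-" or cifra[0] == "-":
--         return False
--     return True
-- ===== SOURCE B (Python) =====
-- def validar_a_cifra(cifra):
--     """
--     Função auxiliar à função eh_entrada: verifica a validade da cifra.
--     str ---> bool
--     """
--     if type(cifra) != str or len(cifra) == 0:
--         return False
--     # One pass: remember whether the previous position was a hyphen (start counts
--     # as one, so a leading hyphen or a double hyphen is caught immediately, and a
--     # trailing hyphen is caught by the final check).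
--     prev_hyphen = True
--     for c in cifra:
--         if c == "-":
--             if prev_hyphen:
--                 return False
--             prev_hyphen = True
--         elif c.isalpha() and c == c.lower():
--             prev_hyphen = False
--         else:
--             return False
--     return not prev_hyphen
-- ===== Notes on version B (the rewrite author's own statement) =====
-- stated objective: simpler
-- what changed: Replaces A's three passes (per-char filter, adjacent-pair while loop, first/last index checks) with a single left-to-right pass of a two-state automaton tracking whether the previous position was a hyphen.
import Mathlib
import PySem

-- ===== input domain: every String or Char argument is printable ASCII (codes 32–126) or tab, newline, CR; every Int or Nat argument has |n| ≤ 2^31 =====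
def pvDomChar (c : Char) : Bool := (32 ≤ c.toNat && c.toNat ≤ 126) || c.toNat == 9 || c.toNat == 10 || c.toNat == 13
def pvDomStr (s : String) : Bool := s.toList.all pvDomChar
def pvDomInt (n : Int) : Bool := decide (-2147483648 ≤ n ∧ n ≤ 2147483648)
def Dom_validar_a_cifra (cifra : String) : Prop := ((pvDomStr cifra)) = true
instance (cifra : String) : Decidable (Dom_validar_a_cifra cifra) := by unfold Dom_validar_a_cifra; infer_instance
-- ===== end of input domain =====

-- B replaces A's three passes (per-char filter, adjacent-pair while loop, first/last
-- checks) with a single pass of a two-state automaton; same cost, simpler.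


-- ===== PORT A =====
-- the `while i < len(cifra) - 1` loop of A: true iff some adjacent pair is "--"
def pvA_dd : List Char → Bool
  | a :: b :: rest => if a == '-' && a == b then true else pvA_dd (b :: rest)
  | _ => false

def validar_a_cifra (cifra : String) : Bool :=
  if cifra.toList.length == 0 then false
  else if cifra.toList.any (fun c =>
      (!(PySem.Chars.isalpha c) && !(c == '-')) ||
      (cifra.toList.length == 1 && c == '-') ||
      !(PySem.Chars.lowerChar c == c)) then false
  else if pvA_dd cifra.toList then false
  else if PySem.List.pyGet? cifra.toList (-1) == some '-' || PySem.List.pyGet? cifra.toList 0 == some '-' then false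
  else true

-- ===== PORT B =====
-- B's single for-loop; the flag records whether the previous position was a hyphen (start = yes)
def pvB_loop : List Char → Bool → Bool
  | [], prevH => !prevH
  | c :: rest, prevH =>
    if c == '-' then
      if prevH then false else pvB_loop rest true
    else if PySem.Chars.isalpha c && c == PySem.Chars.lowerChar c then
      pvB_loop rest false
    else false

def validar_a_cifra_alt (cifra : String) : Bool :=
  if cifra.toList.length == 0 then false
  else pvB_loop cifra.toList true

-- ===== PRECONDITION & SPEC =====
def Spec_validar_a_cifra (cifra : String) (out : Bool) : Prop := out = validar_a_cifra_alt cifra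
instance (cifra : String) (out : Bool) : Decidable (Spec_validar_a_cifra cifra out) := by unfold Spec_validar_a_cifra; infer_instance

-- ===== CLAIM (what is proved, stated in full; the proofs are below) =====
def Claim_equal_validar_a_cifra : Prop := ∀ (cifra : String), Dom_validar_a_cifra cifra → Spec_validar_a_cifra cifra (validar_a_cifra cifra)

-- ===== LEMMAS AND PROOFS =====
-- a character A's per-char pass accepts (ignoring the length-1 clause)
def pvOkc (c : Char) : Bool := (PySem.Chars.isalpha c && PySem.Chars.lowerChar c == c) || c == '-'
def pvOkA (cs : List Char) : Bool := cs.all pvOkc && !pvA_dd cs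
def pvEndsH (cs : List Char) : Bool := cs.getLast? == some '-'

lemma pvB_step (c : Char) (r : List Char) (p : Bool) :
    pvB_loop (c :: r) p =
      (if c == '-' then (if p then false else pvB_loop r true)
       else if PySem.Chars.isalpha c && c == PySem.Chars.lowerChar c then pvB_loop r false
       else false) := rfl

lemma pvB_loop_char : ∀ cs : List Char,
    pvB_loop cs false = (pvOkA cs && !pvEndsH cs) ∧
    pvB_loop cs true = (pvOkA cs && !pvEndsH cs && !(cs.head? == some '-') && !cs.isEmpty) := by
  intro cs
  induction cs with
  | nil => simp [pvB_loop, pvOkA, pvEndsH, pvA_dd]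
  | cons c r ih =>
    obtain ⟨ih0, ih1⟩ := ih
    rw [pvB_step, pvB_step]
    by_cases hc : c = '-'
    · subst hc
      cases r with
      | nil => simp [pvB_loop, pvOkA, pvEndsH, pvA_dd]
      | cons b rest =>
        rw [ih1]
        by_cases hb : b = '-'
        · subst hb
          have hdd : pvA_dd ('-' :: '-' :: rest) = true := by simp [pvA_dd]
          simp [pvOkA, hdd]
        · have hx : pvOkc '-' = true := by decide
          have hy : ('-' == b) = false := by rw [beq_eq_false_iff_ne]; exact Ne.symm hb
          have hdd : pvA_dd ('-' :: b :: rest) = pvA_dd (b :: rest) := by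
            simp [pvA_dd, hy]
          simp [pvOkA, pvEndsH, hdd, hb, hx]
    · by_cases hg : (PySem.Chars.isalpha c && PySem.Chars.lowerChar c == c) = true
      · have hg' : (PySem.Chars.isalpha c && c == PySem.Chars.lowerChar c) = true := by
          simp at hg ⊢; exact ⟨hg.1, hg.2.symm⟩
        rw [if_neg (by simp [hc]), if_pos hg', ih0]
        cases r with
        | nil => simp [pvOkA, pvEndsH, pvA_dd, pvOkc, hc, hg]
        | cons b rest =>
          by_cases hb : b = '-' <;>
            simp [pvOkA, pvEndsH, pvA_dd, pvOkc, hc, hg, hb]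
      · have hg' : (PySem.Chars.isalpha c && c == PySem.Chars.lowerChar c) = false := by
          simp at hg ⊢; intro ha hl; exact absurd hl.symm (hg ha)
        rw [if_neg (by simp [hc]), hg']
        simp [pvOkA, pvOkc, hc, hg]

lemma pvOkc_not_bad (c : Char) :
    (!((!(PySem.Chars.isalpha c) && !(c == '-')) || !(PySem.Chars.lowerChar c == c))) = pvOkc c := by
  by_cases h : c = '-'
  · subst h; decide
  · by_cases h1 : PySem.Chars.isalpha c <;> by_cases h2 : PySem.Chars.lowerChar c = c <;>
      simp [pvOkc, h, h1, h2]

lemma pyGet_neg_one (cs : List Char) (h : cs ≠ []) :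
    PySem.List.pyGet? cs (-1) = cs.getLast? := by
  have hn : 1 ≤ cs.length := List.length_pos_iff.mpr h
  simp [PySem.List.pyGet?, PySem.List.pyIdx?]
  rw [if_pos hn, List.getLast?_eq_getElem?]
  simp

lemma pyGet_zero (cs : List Char) (h : cs ≠ []) :
    PySem.List.pyGet? cs 0 = cs.head? := by
  have hn : 0 < cs.length := List.length_pos_iff.mpr h
  simp [PySem.List.pyGet?, PySem.List.pyIdx?]
  rw [if_pos hn, List.head?_eq_getElem?]
  simp

-- ===== VERDICT (by name: the statement is the Claim_ definition above) =====
theorem validar_a_cifra_spec : Claim_equal_validar_a_cifra := by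
  intro cifra _
  unfold Spec_validar_a_cifra validar_a_cifra validar_a_cifra_alt
  cases hcs : cifra.toList with
  | nil => simp
  | cons c r =>
    cases r with
    | nil =>
      rw [pyGet_neg_one _ (by simp), pyGet_zero _ (by simp)]
      by_cases h3 : c = '-'
      · subst h3; decide
      · by_cases h1 : PySem.Chars.isalpha c <;> by_cases h2 : PySem.Chars.lowerChar c = c <;>
          simp [pvB_loop, pvA_dd, h1, h2, h3] <;> (try exact ne_comm.mp h2)
    | cons b rest =>
      have hne : (c :: b :: rest : List Char) ≠ [] := by simp
      have hlen : ((c :: b :: rest : List Char).length == 1) = false := by simp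
      rw [pyGet_neg_one _ hne, pyGet_zero _ hne, (pvB_loop_char (c :: b :: rest)).2]
      have hany : ((c :: b :: rest : List Char).any (fun x =>
          (!(PySem.Chars.isalpha x) && !(x == '-')) ||
          ((c :: b :: rest : List Char).length == 1 && x == '-') ||
          !(PySem.Chars.lowerChar x == x))) = !((c :: b :: rest : List Char).all pvOkc) := by
        rw [List.any_eq_not_all_not]
        congr 1
        refine List.all_congr rfl fun x => ?_
        rw [← pvOkc_not_bad x, hlen]
        simp
      rw [hany]
      by_cases hall : ((c :: b :: rest : List Char).all pvOkc) = true <;>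
        by_cases hdd : pvA_dd (c :: b :: rest) = true <;>
        by_cases hl : ((b :: rest : List Char).getLast? = some '-') <;>
        by_cases hc : c = '-' <;>
        simp [pvOkA, pvEndsH, hall, hdd, hl, hc, List.getLast?_cons_cons]
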